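-- pv_equiv track=rewrite | github.com/MaSch882/advent_of_code | loesungen/python/year_2024/day_04/problem_04.py | is_cross
-- ===== SOURCE A (Python) =====
-- def is_cross(lattice: list[str], row_number: int, column_number: int) -> bool:
--     valid_words = ["MAS", "SAM"]
--
--     main_diagonal = ""
--     non_diagonal = ""
--
--     for i in range(3):
--         try:
--             main_diagonal += lattice[row_number + i][column_number + i]
--             non_diagonal += lattice[row_number + 2 - i][column_number + i]
--         except IndexError:
--             break
--
--     return main_diagonal in valid_words and non_diagonal in valid_words
-- ===== SOURCE B (Python) =====
-- def _ms(x, y):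
--     return (x == "M" and y == "S") or (x == "S" and y == "M")
--
--
-- def is_cross(lattice: list[str], row_number: int, column_number: int) -> bool:
--     try:
--         centre = lattice[row_number + 1][column_number + 1]
--         top_left = lattice[row_number][column_number]
--         bottom_right = lattice[row_number + 2][column_number + 2]
--         bottom_left = lattice[row_number + 2][column_number]
--         top_right = lattice[row_number][column_number + 2]
--     except IndexError:
--         return False
--     return centre == "A" and _ms(top_left, bottom_right) and _ms(bottom_left, top_right)
-- ===== Notes on version B (the rewrite author's own statement) =====
-- stated objective: simpler
-- what changed: Instead of looping to concatenate two 3-char diagonal strings and testing list membership, B reads the five cells once inside one try/except and checks centre=='A' plus an M/S-pair test on each pair of opposite corners.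
import Mathlib
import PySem

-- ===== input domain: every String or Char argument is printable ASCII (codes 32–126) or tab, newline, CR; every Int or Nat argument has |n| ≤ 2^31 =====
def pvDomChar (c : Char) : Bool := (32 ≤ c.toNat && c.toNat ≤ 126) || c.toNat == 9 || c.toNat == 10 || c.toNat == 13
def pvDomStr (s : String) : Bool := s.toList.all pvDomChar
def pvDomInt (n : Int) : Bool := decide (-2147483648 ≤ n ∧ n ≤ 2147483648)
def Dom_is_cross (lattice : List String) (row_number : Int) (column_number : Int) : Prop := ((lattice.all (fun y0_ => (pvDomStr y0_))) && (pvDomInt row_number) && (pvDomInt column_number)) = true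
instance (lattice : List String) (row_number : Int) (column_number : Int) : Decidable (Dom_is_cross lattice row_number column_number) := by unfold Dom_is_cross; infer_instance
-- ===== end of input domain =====

-- B replaces A's loop that concatenates two 3-character diagonal strings and tests list
-- membership by reading the five cells once inside one try/except and checking
-- centre == 'A' plus an M/S-pair test on each pair of opposite corners (objective: simpler).

-- lattice[r][c] with Python index semantics (negative wraparound, IndexError = none)
def pvCell (lattice : List String) (r c : Int) : Option Char :=
  (PySem.List.pyGet? lattice r).bind (fun s => PySem.Str.pyGet? s c)

-- ===== PORT A =====
def is_cross (lattice : List String) (row_number : Int) (column_number : Int) : Bool :=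
  -- for i in range(3): try: main += …; non += … except IndexError: break
  let st := (PySem.List.pyRange 0 3 1).foldl
    (fun (acc : String × String × Bool) i =>
      match acc with
      | (md, nd, broken) =>
        if broken then (md, nd, broken)
        else
          match pvCell lattice (row_number + i) (column_number + i) with
          | none => (md, nd, true)
          | some c1 =>
            match pvCell lattice (row_number + 2 - i) (column_number + i) with
            | none => (md.push c1, nd, true)
            | some c2 => (md.push c1, nd.push c2, false))
    ("", "", false)
  (["MAS", "SAM"].contains st.1) && (["MAS", "SAM"].contains st.2.1)

-- ===== PORT B =====
def pvMS (x y : Char) : Bool :=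
  (x == 'M' && y == 'S') || (x == 'S' && y == 'M')

def is_cross_alt (lattice : List String) (row_number : Int) (column_number : Int) : Bool :=
  -- one try/except around the five reads: any IndexError → false
  match pvCell lattice (row_number + 1) (column_number + 1) with
  | none => false
  | some centre =>
    match pvCell lattice row_number column_number with
    | none => false
    | some top_left =>
      match pvCell lattice (row_number + 2) (column_number + 2) with
      | none => false
      | some bottom_right =>
        match pvCell lattice (row_number + 2) column_number with
        | none => false
        | some bottom_left =>
          match pvCell lattice row_number (column_number + 2) with
          | none => false
          | some top_right =>
            centre == 'A' && pvMS top_left bottom_right && pvMS bottom_left top_right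

-- ===== PRECONDITION & SPEC =====
def Spec_is_cross (lattice : List String) (row_number : Int) (column_number : Int) (out : Bool) : Prop := out = is_cross_alt lattice row_number column_number
instance (lattice : List String) (row_number : Int) (column_number : Int) (out : Bool) : Decidable (Spec_is_cross lattice row_number column_number out) := by unfold Spec_is_cross; infer_instance

-- ===== CLAIM (what is proved, stated in full; the proofs are below) =====
def Claim_equal_is_cross : Prop := ∀ (lattice : List String) (row_number : Int) (column_number : Int), Dom_is_cross lattice row_number column_number → Spec_is_cross lattice row_number column_number (is_cross lattice row_number column_number)

-- ===== LEMMAS AND PROOFS =====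

theorem pyRange03 : PySem.List.pyRange 0 3 1 = [0, 1, 2] := by decide

-- ===== VERDICT (by name: the statement is the Claim_ definition above) =====
theorem is_cross_spec : Claim_equal_is_cross := by
  intro lattice r c _
  unfold Spec_is_cross is_cross is_cross_alt
  have e0 : r + (0 : Int) = r := by ring
  have e1 : r + 2 - 0 = r + 2 := by ring
  have e2 : r + 2 - 1 = r + 1 := by ring
  have e3 : r + 2 - 2 = r := by ring
  have f0 : c + (0 : Int) = c := by ring
  simp only [pyRange03, List.foldl, e0, e1, e2, e3, f0]
  cases h1 : pvCell lattice r c <;>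
    cases h2 : pvCell lattice (r + 2) c <;>
      cases h3 : pvCell lattice (r + 1) (c + 1) <;>
        cases h4 : pvCell lattice (r + 2) (c + 2) <;>
          cases h5 : pvCell lattice r (c + 2) <;>
            simp only [h1, h2, h3, h4, h5] <;>
              (try rw [Bool.eq_iff_iff]) <;>
                (try simp [pvMS, String.ext_iff]) <;>
                  tauto
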